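-- pv_equiv track=rewrite | github.com/snorose-front-study/coding-test-study | minju/week1/1316.py | check
-- ===== SOURCE A (Python) =====
-- def check(thisSet, thisList):
--     for i in thisSet:
--         check = 0
--         last = -1
--         while (check != thisList.count(i)):
--             now = thisList.index(i,last+1)
--             if check == 0:
--                 last = now
--             elif now != last+1:
--                 return 0
--             last = now
--             check += 1
--     return 1
-- ===== SOURCE B (Python) =====
-- def check(thisSet, thisList):
--     relevant = set(thisSet)
--     seen = set()
--     prev = None
--     for x in thisList:
--         if x != prev:
--             if x in seen and x in relevant:
--                 return 0
--             seen.add(x)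
--             prev = x
--     return 1
-- ===== Notes on version B (the rewrite author's own statement) =====
-- stated objective: faster
-- what changed: Replaces A's per-element count/index rescans (a while loop calling thisList.count and thisList.index for every element of thisSet) with a single left-to-right pass over thisList that tracks the previously seen distinct elements in a set: a character that reappears non-adjacently and belongs to thisSet immediately yields 0.
import Mathlib
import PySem

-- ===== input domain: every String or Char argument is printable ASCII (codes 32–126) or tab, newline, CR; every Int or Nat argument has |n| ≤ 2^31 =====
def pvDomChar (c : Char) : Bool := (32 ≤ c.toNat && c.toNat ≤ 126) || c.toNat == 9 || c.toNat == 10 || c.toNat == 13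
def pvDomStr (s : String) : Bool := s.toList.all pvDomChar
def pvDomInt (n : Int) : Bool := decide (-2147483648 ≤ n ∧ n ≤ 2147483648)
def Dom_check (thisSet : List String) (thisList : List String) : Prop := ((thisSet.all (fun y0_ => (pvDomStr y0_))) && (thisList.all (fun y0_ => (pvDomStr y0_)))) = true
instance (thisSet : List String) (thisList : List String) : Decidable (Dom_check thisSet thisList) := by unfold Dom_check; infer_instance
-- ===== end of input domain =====

-- B replaces A's per-element count/index rescans with one left-to-right pass over
-- thisList tracking the set of elements already seen (objective: asymptotically faster).

-- ===== PORT A =====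
-- Python's thisList.index(i, start): first index ≥ start holding i (none = ValueError).
-- Exact for start ≥ 0, which covers every call A makes (start = last+1, last ≥ -1).
def pyIndexFrom (xs : List String) (v : String) (start : Int) : Option Int :=
  (PySem.List.index? (xs.drop start.toNat) v).map (fun k => (k : Int) + start)

-- the 'while (check != thisList.count(i))' loop; fuel = count - check, which falls by 1
-- each iteration.  The 'none' branch is a totality guard only (list.index would raise;
-- the fuel bound makes it unreachable).
def whileA (l : List String) (i : String) : Nat → Int → Int → Bool
  | 0, _, _ => true
  | fuel + 1, chk, last =>
    match pyIndexFrom l i (last + 1) with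
    | none => true
    | some now =>
      if chk = 0 then whileA l i fuel (chk + 1) now
      else if now ≠ last + 1 then false
      else whileA l i fuel (chk + 1) now

def check (thisSet : List String) (thisList : List String) : Int :=
  match thisSet with
  | [] => 1
  | i :: rest =>
    if whileA thisList i (thisList.count i) 0 (-1) then check rest thisList else 0

-- ===== PORT B =====
-- the 'for x in thisList' loop of Source B; state: seen (a Python set), prev (None at start)
def loopB (rel : PySem.Set String) (l : List String) (seen : PySem.Set String)
    (prev : Option String) : Int :=
  match l with
  | [] => 1
  | x :: rest =>
    if some x ≠ prev then
      if PySem.Set.contains seen x && PySem.Set.contains rel x then 0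
      else loopB rel rest (PySem.Set.add seen x) (some x)
    else loopB rel rest seen prev

def check_alt (thisSet : List String) (thisList : List String) : Int :=
  loopB (PySem.Set.ofList thisSet) thisList PySem.Set.empty none

-- ===== PRECONDITION & SPEC =====
def Spec_check (thisSet : List String) (thisList : List String) (out : Int) : Prop := out = check_alt thisSet thisList
instance (thisSet : List String) (thisList : List String) (out : Int) : Decidable (Spec_check thisSet thisList out) := by unfold Spec_check; infer_instance

-- ===== CLAIM (what is proved, stated in full; the proofs are below) =====
def Claim_equal_check : Prop := ∀ (thisSet : List String) (thisList : List String), Dom_check thisSet thisList → Spec_check thisSet thisList (check thisSet thisList)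

-- ===== LEMMAS AND PROOFS =====

-- "the occurrences of i are contiguous", as a pair of small boolean automata:
-- run r i: we are inside (or just past) the block of i's — after skipping the
-- continuing i's no further i may occur; cont l i: the block has not started yet.
def runC (r : List String) (i : String) : Bool :=
  !((r.dropWhile (fun x => x = i)).contains i)

def contC (l : List String) (i : String) : Bool :=
  match l.dropWhile (fun x => x ≠ i) with
  | [] => true
  | _ :: r => runC r i

lemma runC_cons_self (r : List String) (i : String) : runC (i :: r) i = runC r i := by
  simp [runC, List.dropWhile]

lemma runC_cons_ne (x : String) (r : List String) (i : String) (h : x ≠ i) :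
    runC (x :: r) i = !((x :: r).contains i) := by
  simp [runC, List.dropWhile, h]

lemma contC_cons_self (r : List String) (i : String) : contC (i :: r) i = runC r i := by
  simp [contC, List.dropWhile]

lemma contC_cons_ne (x : String) (r : List String) (i : String) (h : x ≠ i) :
    contC (x :: r) i = contC r i := by
  simp [contC, List.dropWhile, h]

lemma contC_of_not_mem (l : List String) (i : String) (h : i ∉ l) : contC l i = true := by
  induction l with
  | nil => rfl
  | cons x xs ih =>
    have hx : x ≠ i := by rintro rfl; exact h (List.mem_cons_self)
    rw [contC_cons_ne x xs i hx]
    exact ih (fun hm => h (List.mem_cons_of_mem _ hm))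

-- ===== the A side =====

-- continuation phase: chk ≥ 1, l.drop (last+1) = r, fuel = r.count i
lemma whileA_run (l : List String) (i : String) :
    ∀ (fuel : Nat) (chk last : Int) (r : List String),
      0 ≤ last → l.drop (last + 1).toNat = r → fuel = r.count i → 1 ≤ chk →
      whileA l i fuel chk last = runC r i := by
  intro fuel
  induction fuel with
  | zero =>
    intro chk last r _ hdrop hcnt _
    have hni : i ∉ r := by
      rw [← List.count_eq_zero]; omega
    have h2 : i ∉ r.dropWhile (fun x => x = i) :=
      fun hm => hni ((List.dropWhile_sublist _).subset hm)
    simp [whileA, runC, h2]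
  | succ f ih =>
    intro chk last r hlast hdrop hcnt hchk
    have hmem : i ∈ r := by
      have : r.count i ≠ 0 := by omega
      exact List.count_pos_iff.mp (Nat.pos_of_ne_zero this)
    obtain ⟨k, hk⟩ := Option.isSome_iff_exists.mp ((PySem.List.index?_isSome_iff r i).mpr hmem)
    obtain ⟨pre, suf, hr, hlen, hpre⟩ := (PySem.List.index?_eq_some_iff r i k).mp hk
    have hpi : pyIndexFrom l i (last + 1) = some ((k : Int) + (last + 1)) := by
      unfold pyIndexFrom
      rw [hdrop, hk]; rfl
    have hchk0 : ¬ chk = 0 := by omega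
    simp only [whileA, hpi, if_neg hchk0]
    cases pre with
    | nil =>
      simp only [List.length_nil] at hlen
      subst hlen
      simp only [List.nil_append] at hr
      subst hr
      rw [show ((0 : Nat) : Int) + (last + 1) = last + 1 by simp]
      rw [if_neg (by omega : ¬ (last + 1 ≠ last + 1))]
      have hdrop' : l.drop (last + 1 + 1).toNat = suf := by
        have ht : (last + 1 + 1).toNat = (last + 1).toNat + 1 := by omega
        rw [ht, ← List.drop_drop, hdrop, List.drop_one, List.tail_cons]
      rw [ih (chk + 1) (last + 1) suf (by omega) hdrop'
          (by simp at hcnt; omega) (by omega)]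
      rw [runC_cons_self]
    | cons x pre' =>
      have hxne : x ≠ i := fun h => hpre (h ▸ List.mem_cons_self)
      have hknz : k ≠ 0 := by
        subst hlen; simp
      have hnow : ((k : Int) + (last + 1) ≠ last + 1) := by
        have : (1 : Int) ≤ (k : Int) := by exact_mod_cast Nat.one_le_iff_ne_zero.mpr hknz
        omega
      rw [if_pos hnow]
      have hxr : r = x :: (pre' ++ i :: suf) := by simpa using hr
      rw [hxr, runC_cons_ne x _ i hxne]
      simp

-- first phase + assembly: the per-element equality
lemma whileA_eq_contC (l : List String) (i : String) :
    whileA l i (l.count i) 0 (-1) = contC l i := by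
  cases hc : l.count i with
  | zero =>
    have hni : i ∉ l := by rw [← List.count_eq_zero]; exact hc
    rw [contC_of_not_mem l i hni]; rfl
  | succ f =>
    have hmem : i ∈ l := List.count_pos_iff.mp (by omega)
    obtain ⟨k, hk⟩ := Option.isSome_iff_exists.mp ((PySem.List.index?_isSome_iff l i).mpr hmem)
    obtain ⟨pre, suf, hr, hlen, hpre⟩ := (PySem.List.index?_eq_some_iff l i k).mp hk
    have hpi : pyIndexFrom l i (-1 + 1) = some ((k : Int) + 0) := by
      unfold pyIndexFrom
      rw [show ((-1 : Int) + 1) = 0 from rfl]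
      rw [show ((0 : Int).toNat) = 0 from rfl, List.drop_zero, hk]; rfl
    simp only [whileA, hpi]
    have hdrop' : l.drop ((k : Int) + 0 + 1).toNat = suf := by
      have ht : ((k : Int) + 0 + 1).toNat = pre.length + 1 := by omega
      rw [ht, show pre.length + 1 = pre.length + 1 from rfl, hr,
          ← List.drop_drop, List.drop_left, List.drop_one, List.tail_cons]
    have hcount : f = suf.count i := by
      rw [hr] at hc
      simp [List.count_append, List.count_eq_zero.mpr hpre] at hc
      omega
    rw [whileA_run l i f (0 + 1) ((k : Int) + 0) suf (by omega) hdrop' hcount (by omega)]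
    have hdw : l.dropWhile (fun x => x ≠ i) = i :: suf := by
      rw [hr, List.dropWhile_append]
      have h1 : pre.dropWhile (fun x => x ≠ i) = [] := by
        rw [List.dropWhile_eq_nil_iff]
        intro x hx
        have hxne : x ≠ i := fun h => hpre (h ▸ hx)
        simp [hxne]
      rw [h1]
      simp
    rw [contC, hdw]
    simp

-- A as an 'all the elements are contiguous' test
lemma check_eq_if (thisSet thisList : List String) :
    check thisSet thisList =
      if thisSet.all (fun i => contC thisList i) then 1 else 0 := by
  induction thisSet with
  | nil => simp [check]
  | cons i rest ih =>
    rw [check, whileA_eq_contC, ih, List.all_cons]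
    by_cases h : contC thisList i <;> simp [h]

-- ===== the B side =====

-- the per-element state of B's scan, seen from element i
def phiB (seen : PySem.Set String) (prev : Option String) (l : List String) (i : String) : Bool :=
  if prev = some i then runC l i
  else if PySem.Set.contains seen i then !(l.contains i)
  else contC l i

lemma phiB_nil (seen : PySem.Set String) (prev : Option String) (i : String) :
    phiB seen prev [] i = true := by
  unfold phiB
  split_ifs <;> simp [runC, contC]

lemma all_congr_mem {α : Type} (l : List α) (f g : α → Bool)
    (h : ∀ x ∈ l, f x = g x) : l.all f = l.all g := by
  induction l with
  | nil => rfl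
  | cons x xs ih =>
    simp only [List.all_cons]
    rw [h x List.mem_cons_self, ih (fun y hy => h y (List.mem_cons_of_mem _ hy))]

lemma loopB_eq_if (rel : PySem.Set String) (l : List String) :
    ∀ (seen : PySem.Set String) (prev : Option String),
      (∀ p, prev = some p → p ∈ seen) →
      loopB rel l seen prev =
        if rel.all (fun i => phiB seen prev l i) then 1 else 0 := by
  induction l with
  | nil =>
    intro seen prev _
    simp [loopB, phiB_nil]
  | cons x rest ih =>
    intro seen prev hinv
    rw [loopB]
    by_cases hprev : some x = prev
    · rw [if_neg (by simpa using hprev)]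
      rw [ih seen prev hinv]
      have hpt : ∀ i, phiB seen prev rest i = phiB seen prev (x :: rest) i := by
        intro i
        by_cases hxi : i = x
        · subst hxi
          unfold phiB
          rw [if_pos hprev.symm, if_pos hprev.symm, runC_cons_self]
        · unfold phiB
          have hxne : x ≠ i := Ne.symm hxi
          rw [contC_cons_ne x rest i hxne]
          have hcont : (x :: rest).contains i = rest.contains i := by
            simp only [List.contains_cons]
            rw [show (i == x) = false from beq_eq_false_iff_ne.mpr hxi, Bool.false_or]
          rw [hcont]
          have hpne : ¬ prev = some i :=
            fun h => hxne (Option.some_inj.mp (hprev.trans h))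
          rw [if_neg hpne, if_neg hpne]
      have : (fun i => phiB seen prev rest i) = (fun i => phiB seen prev (x :: rest) i) :=
        funext hpt
      rw [this]
    · rw [if_pos hprev]
      by_cases h1 : (PySem.Set.contains seen x && PySem.Set.contains rel x) = true
      · rw [if_pos h1]
        obtain ⟨hs, hrel⟩ := Bool.and_eq_true_iff.mp h1
        have hfalse : rel.all (fun i => phiB seen prev (x :: rest) i) = false := by
          rw [List.all_eq_false]
          refine ⟨x, (PySem.Set.contains_iff _ _).mp hrel, ?_⟩
          unfold phiB
          rw [if_neg (fun h => hprev h.symm), if_pos hs]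
          simp
        rw [hfalse]
        simp
      · rw [if_neg h1]
        have hinv' : ∀ p, some x = some p → p ∈ PySem.Set.add seen x := by
          intro p hp
          rw [PySem.Set.mem_add]
          right; exact (Option.some_inj.mp hp).symm
        rw [ih (PySem.Set.add seen x) (some x) hinv']
        have hpt : ∀ i ∈ rel, phiB (PySem.Set.add seen x) (some x) rest i
            = phiB seen prev (x :: rest) i := by
          intro i hi
          by_cases hxi : i = x
          · subst hxi
            have hsx : PySem.Set.contains seen i = false := by
              by_contra hcon
              exact h1 (by
                rw [Bool.and_eq_true_iff]
                exact ⟨Bool.of_not_eq_false hcon, (PySem.Set.contains_iff _ _).mpr hi⟩)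
            unfold phiB
            rw [if_pos rfl, if_neg (fun h => hprev h.symm), hsx]
            simp only [Bool.false_eq_true, if_false]
            rw [contC_cons_self]
          · have hxne : x ≠ i := Ne.symm hxi
            have hcadd : PySem.Set.contains (PySem.Set.add seen x) i
                = PySem.Set.contains seen i := by
              by_cases hm : i ∈ seen
              · rw [(PySem.Set.contains_iff _ _).mpr hm,
                    (PySem.Set.contains_iff _ _).mpr (by rw [PySem.Set.mem_add]; exact Or.inl hm)]
              · have h2 : i ∉ PySem.Set.add seen x := by
                  rw [PySem.Set.mem_add]
                  rintro (h | h); exact hm h; exact hxi h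
                rw [Bool.eq_false_iff.mpr (fun hc => h2 ((PySem.Set.contains_iff _ _).mp hc)),
                    Bool.eq_false_iff.mpr (fun hc => hm ((PySem.Set.contains_iff _ _).mp hc))]
            have hcont : (x :: rest).contains i = rest.contains i := by
              simp only [List.contains_cons]
              rw [show (i == x) = false from beq_eq_false_iff_ne.mpr hxi, Bool.false_or]
            unfold phiB
            rw [if_neg (fun h => hxne (Option.some_inj.mp h)), hcadd, hcont]
            by_cases hpi : prev = some i
            · rw [if_pos hpi]
              have hiseen : PySem.Set.contains seen i = true :=
                (PySem.Set.contains_iff _ _).mpr (hinv i hpi)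
              rw [hiseen]
              simp only [if_true]
              rw [runC_cons_ne x rest i hxne, hcont]
            · rw [if_neg hpi, contC_cons_ne x rest i hxne]
        exact (if_congr (by rw [all_congr_mem rel _ _ hpt]) rfl rfl)

lemma check_alt_eq_if (thisSet thisList : List String) :
    check_alt thisSet thisList =
      if thisSet.all (fun i => contC thisList i) then 1 else 0 := by
  unfold check_alt
  rw [loopB_eq_if _ _ PySem.Set.empty none (by intro p hp; cases hp)]
  have hphi : (fun i => phiB PySem.Set.empty none thisList i)
      = (fun i => contC thisList i) := by
    funext i
    unfold phiB
    rw [if_neg (by simp : ¬ (none = some i))]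
    rw [show PySem.Set.contains PySem.Set.empty i = false from rfl]
    simp
  rw [hphi]
  have hall : (PySem.Set.ofList thisSet).all (fun i => contC thisList i)
      = thisSet.all (fun i => contC thisList i) := by
    rw [Bool.eq_iff_iff]
    simp only [List.all_eq_true]
    constructor
    · intro h i hi
      exact h i (by rw [PySem.Set.mem_ofList]; exact hi)
    · intro h i hi
      exact h i (by rw [← PySem.Set.mem_ofList]; exact hi)
  rw [hall]

-- ===== VERDICT (by name: the statement is the Claim_ definition above) =====
theorem check_spec : Claim_equal_check := by
  intro thisSet thisList _
  unfold Spec_check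
  rw [check_eq_if, check_alt_eq_if]
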